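-- pv_equiv track=rewrite | github.com/ashjambhulkar/objectoriented | LeetCodePremium/Google/waystosplitstring.py | helper
-- ===== SOURCE A (Python) =====
-- import collections
--
-- def helper(string):
--     start = 0
--     left = collections.Counter(string[0])
--     right = collections.Counter(string[1:])
--     count = 0
--     for end in range(1, len(string)):
--         if left.keys() == right.keys():
--             count += 1
--         start += 1
--         left[string[start]] += 1
--         if left[string[start]] == 0:
--             del left[string[start]]
--         right[string[end]] -= 1
--         if right[string[end]] == 0:
--             del right[string[end]]
--     return count
-- ===== SOURCE B (Python) =====
-- def helper(string):
--     suffix_sets = []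
--     seen = set()
--     for c in reversed(string):
--         seen = seen | {c}
--         suffix_sets.append(seen)
--     suffix_sets.reverse()  # suffix_sets[i] == set(string[i:])
--     prefix = set()
--     count = 0
--     for i in range(1, len(string)):
--         prefix = prefix | {string[i - 1]}
--         if prefix == suffix_sets[i]:
--             count += 1
--     return count
-- ===== Notes on version B (the rewrite author's own statement) =====
-- stated objective: simpler
-- what changed: Replaces the incrementally maintained pair of Counters (sliding window with add/subtract/delete bookkeeping) by two plain passes: precompute the suffix distinct-character sets right-to-left, then count split indices where the growing prefix set equals the stored suffix set.
import Mathlib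
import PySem

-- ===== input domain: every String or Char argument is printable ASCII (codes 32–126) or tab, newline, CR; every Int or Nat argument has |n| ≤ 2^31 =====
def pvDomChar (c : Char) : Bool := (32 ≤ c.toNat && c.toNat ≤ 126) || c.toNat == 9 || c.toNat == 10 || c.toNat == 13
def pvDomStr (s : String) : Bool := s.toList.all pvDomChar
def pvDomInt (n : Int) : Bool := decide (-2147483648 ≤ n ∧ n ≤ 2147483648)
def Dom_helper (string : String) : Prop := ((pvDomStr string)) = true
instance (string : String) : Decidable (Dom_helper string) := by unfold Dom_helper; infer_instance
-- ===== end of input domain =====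

-- B replaces A's sliding pair of Counters by two passes over plain sets: precompute the suffix
-- distinct-character sets, then compare each with the growing prefix set. Simpler, not faster.

-- ===== PORT A =====
-- the body of A's for-loop, state = (start, left, right, count)
def helperStep (cs : List Char)
    (st : Int × PySem.Dict Char Int × PySem.Dict Char Int × Int) (e : Int) :
    Int × PySem.Dict Char Int × PySem.Dict Char Int × Int :=
  let start := st.1; let left := st.2.1; let right := st.2.2.1; let count := st.2.2.2
  let count := if PySem.Set.equal left.keys right.keys then count + 1 else count
  let start := start + 1
  let c1 := PySem.List.pyGetD cs start ' '
  let left := left.modify c1 0 (· + 1)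
  let left := if left.getD c1 0 == 0 then left.erase c1 else left
  let c2 := PySem.List.pyGetD cs e ' '
  let right := right.modify c2 0 (· - 1)
  let right := if right.getD c2 0 == 0 then right.erase c2 else right
  (start, left, right, count)

def helper (string : String) : Int :=
  let cs := string.toList
  let left0 : PySem.Dict Char Int := PySem.Dict.counter [PySem.List.pyGetD cs 0 ' ']
  let right0 : PySem.Dict Char Int := PySem.Dict.counter (PySem.List.slice cs (some 1) none)
  ((PySem.List.pyRange 1 (PySem.List.len cs) 1).foldl (helperStep cs) (0, left0, right0, 0)).2.2.2

-- ===== PORT B =====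
def helper_alt (string : String) : Int :=
  let cs := string.toList
  let sr := cs.reverse.foldl
      (fun (st : PySem.Set Char × List (PySem.Set Char)) c =>
        let seen := PySem.Set.union st.1 (PySem.Set.ofList [c])
        (seen, st.2 ++ [seen]))
      (PySem.Set.empty, [])
  let suffixSets := sr.2.reverse
  ((PySem.List.pyRange 1 (PySem.List.len cs) 1).foldl
      (fun (st : PySem.Set Char × Int) i =>
        let pref := PySem.Set.union st.1 (PySem.Set.ofList [PySem.List.pyGetD cs (i - 1) ' '])
        let count := if PySem.Set.equal pref (PySem.List.pyGetD suffixSets i PySem.Set.empty)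
                     then st.2 + 1 else st.2
        (pref, count))
      (PySem.Set.empty, (0 : Int))).2

-- ===== PRECONDITION & SPEC =====
-- Pre_ excludes only the empty string, on which A raises IndexError (string[0]).
def Pre_helper (string : String) : Prop := string ≠ ""
instance (string : String) : Decidable (Pre_helper string) := by unfold Pre_helper; infer_instance
def pvWitness_helper : String := "aba"

def Spec_helper (string : String) (out : Int) : Prop := out = helper_alt string
instance (string : String) (out : Int) : Decidable (Spec_helper string out) := by unfold Spec_helper; infer_instance

-- ===== CLAIM (what is proved, stated in full; the proofs are below) =====
def Claim_equal_helper : Prop := ∀ (string : String), Dom_helper string → Pre_helper string → Spec_helper string (helper string)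

-- ===== LEMMAS AND PROOFS =====

-- the value of right as the loop maintains it: lookups agree with the Counter of the suffix l
def RInv (d : PySem.Dict Char Int) (l : List Char) : Prop :=
  ∀ c, d.get? c = if c ∈ l then some ((l.count c : Int)) else none

theorem get?_erase (d : PySem.Dict Char Int) (k c : Char) :
    (d.erase k).get? c = if c = k then none else d.get? c := by
  rcases d with ⟨its⟩
  simp only [PySem.Dict.erase, PySem.Dict.get?]
  induction its with
  | nil => simp
  | cons p t ih =>
    rcases p with ⟨a, v⟩
    by_cases hak : a = k <;> by_cases hac : a = c <;> by_cases hck : c = k <;>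
      simp_all

theorem RInv_counter (l : List Char) : RInv (PySem.Dict.counter l) l := by
  intro c
  by_cases h : c ∈ l
  · have hc : (PySem.Dict.counter l).contains c = true := by
      rw [PySem.Dict.contains_counter]; simpa using h
    cases hg : (PySem.Dict.counter l).get? c with
    | none =>
      rw [PySem.Dict.get?_eq_none_iff_contains] at hg; rw [hg] at hc; cases hc
    | some v =>
      have := PySem.Dict.getD_counter l c
      rw [PySem.Dict.getD_eq_get?_getD, hg] at this
      simp only [Option.getD_some] at this
      simp [h, this]
  · have hc : (PySem.Dict.counter l).contains c = false := by
      rw [PySem.Dict.contains_counter]; simpa using h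
    rw [← PySem.Dict.get?_eq_none_iff_contains] at hc
    simp [h, hc]

theorem RInv_step (d : PySem.Dict Char Int) (c : Char) (rest : List Char)
    (h : RInv d (c :: rest)) :
    RInv (let d' := d.modify c 0 (· - 1);
          if d'.getD c 0 == 0 then d'.erase c else d') rest := by
  have hget : d.getD c 0 = ((rest.count c : Int) + 1) := by
    rw [PySem.Dict.getD_eq_get?_getD, h c]
    simp
  have hmod : (d.modify c 0 (· - 1)).getD c 0 = (rest.count c : Int) := by
    rw [PySem.Dict.getD_modify_self, hget]; ring
  have hget' : ∀ c', (d.modify c 0 (· - 1)).get? c' =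
      if c' = c then some ((rest.count c : Int)) else d.get? c' := by
    intro c'
    rw [PySem.Dict.modify, PySem.Dict.get?_insert]
    split_ifs with hc
    · rw [hget]; norm_num
    · rfl
  by_cases hz : (rest.count c : Int) = 0
  · have hcz : rest.count c = 0 := by exact_mod_cast hz
    have hcnot : c ∉ rest := by simpa using List.count_eq_zero.mp hcz
    simp only [hmod, hz]
    intro c'
    simp only [beq_self_eq_true, if_true, get?_erase, hget']
    by_cases hcc : c' = c
    · simp [hcc, hcnot]
    · rw [if_neg hcc, if_neg hcc, h c']
      have : c' ∈ c :: rest ↔ c' ∈ rest := by simp [hcc]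
      simp [this, Ne.symm hcc]
  · have hbz : ((rest.count c : Int) == 0) = false := by simpa using hz
    simp only [hmod, hbz, Bool.false_eq_true, if_false]
    intro c'
    rw [hget']
    by_cases hcc : c' = c
    · have hcm : c ∈ rest := by
        rw [← List.count_pos_iff]; omega
      simp [hcc, hcm]
    · rw [if_neg hcc, h c']
      have : c' ∈ c :: rest ↔ c' ∈ rest := by simp [hcc]
      simp [this, Ne.symm hcc]

theorem cond_eq (pre suf : List Char) (d : PySem.Dict Char Int) (h : RInv d suf) :
    PySem.Set.equal (PySem.Dict.counter pre).keys d.keys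
      = PySem.Set.equal (PySem.Set.ofList pre) (PySem.Set.ofList suf) := by
  have hmemd : ∀ x, x ∈ d.keys ↔ x ∈ suf := by
    intro x
    rw [← PySem.Dict.contains_iff_mem_keys]
    constructor
    · intro hx
      by_contra hns
      have := h x
      rw [if_neg hns, PySem.Dict.get?_eq_none_iff_contains] at this
      rw [this] at hx; cases hx
    · intro hx
      have := h x
      rw [if_pos hx] at this
      by_contra hc
      have hf : d.contains x = false := by
        cases hcc : d.contains x
        · rfl
        · exact absurd hcc hc
      rw [← PySem.Dict.get?_eq_none_iff_contains] at hf
      rw [hf] at this; cases this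
  have h1 : PySem.Set.equal (PySem.Dict.counter pre).keys d.keys = true ↔
      ∀ x, x ∈ pre ↔ x ∈ suf := by
    rw [PySem.Set.equal_iff]
    constructor
    · intro hh x
      have := hh x
      rw [PySem.Dict.keys_counter, PySem.Set.mem_ofList, hmemd] at this
      exact this
    · intro hh x
      rw [PySem.Dict.keys_counter, PySem.Set.mem_ofList, hmemd]
      exact hh x
  have h2 : PySem.Set.equal (PySem.Set.ofList pre) (PySem.Set.ofList suf) = true ↔
      ∀ x, x ∈ pre ↔ x ∈ suf := by
    rw [PySem.Set.equal_iff]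
    constructor
    · intro hh x; have := hh x; rwa [PySem.Set.mem_ofList, PySem.Set.mem_ofList] at this
    · intro hh x; rw [PySem.Set.mem_ofList, PySem.Set.mem_ofList]; exact hh x
  by_cases hp : ∀ x, x ∈ pre ↔ x ∈ suf
  · rw [h1.mpr hp, h2.mpr hp]
  · have e1 := (Bool.not_eq_true _).mp (fun hh => hp (h1.mp hh))
    have e2 := (Bool.not_eq_true _).mp (fun hh => hp (h2.mp hh))
    rw [e1, e2]

theorem loop_eq (cs : List Char) (n : Nat) : ∀ (k : Nat), 1 ≤ k → k ≤ cs.length →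
    cs.length - k = n →
    ∀ (d : PySem.Dict Char Int), RInv d (cs.drop k) → ∀ (count : Int),
    ((PySem.List.pyRange (k : Int) (cs.length : Int) 1).foldl (helperStep cs)
        (((k : Int) - 1), PySem.Dict.counter (cs.take k), d, count)).2.2.2
      = (PySem.List.pyRange (k : Int) (cs.length : Int) 1).foldl
          (fun count i =>
            if PySem.Set.equal (PySem.Set.ofList (PySem.List.slice cs none (some i)))
                               (PySem.Set.ofList (PySem.List.slice cs (some i) none))
            then count + 1 else count) count := by
  induction n with
  | zero =>
    intro k hk1 hkn hn d hd count
    have hk : k = cs.length := by omega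
    rw [PySem.List.pyRange_one_eq_nil (by omega)]
    simp [List.foldl]
  | succ n ih =>
    intro k hk1 hkn hn d hd count
    have hklt : k < cs.length := by omega
    rw [PySem.List.pyRange_one_cons (by exact_mod_cast hklt)]
    simp only [List.foldl_cons]
    -- the two loop conditions agree
    have hcond : PySem.Set.equal (PySem.Dict.counter (cs.take k)).keys d.keys
        = PySem.Set.equal (PySem.Set.ofList (PySem.List.slice cs none (some (k : Int))))
                          (PySem.Set.ofList (PySem.List.slice cs (some (k : Int)) none)) := by
      rw [PySem.List.slice_to_natCast, PySem.List.slice_from_natCast]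
      exact cond_eq (cs.take k) (cs.drop k) d hd
    set count' : Int :=
      if PySem.Set.equal (PySem.Set.ofList (PySem.List.slice cs none (some (k : Int))))
                         (PySem.Set.ofList (PySem.List.slice cs (some (k : Int)) none))
      then count + 1 else count with hcount'
    -- evaluate one application of helperStep
    have hc1 : PySem.List.pyGetD cs (((k : Int) - 1) + 1) ' ' = cs[k] := by
      have : ((k : Int) - 1) + 1 = ((k : Nat) : Int) := by ring
      rw [this, PySem.List.pyGetD_natCast, List.getD_eq_getElem?_getD,
        List.getElem?_eq_getElem hklt, Option.getD_some]
    have htake : cs.take k ++ [cs[k]] = cs.take (k + 1) := by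
      rw [List.take_add_one, List.getElem?_eq_getElem hklt]; rfl
    have hleft : (PySem.Dict.counter (cs.take k)).modify cs[k] 0 (· + 1)
        = PySem.Dict.counter (cs.take (k + 1)) := by
      rw [← htake, PySem.Dict.counter_append_singleton]
    have hmemtake : cs[k] ∈ cs.take (k + 1) := by
      have hlen2 : k < (cs.take (k + 1)).length := by
        simp [List.length_take]; omega
      have hmem := List.getElem_mem hlen2
      simpa using hmem
    have hnotz : ((PySem.Dict.counter (cs.take (k + 1))).getD cs[k] 0 == 0) = false := by
      rw [PySem.Dict.getD_counter]
      have : 0 < (cs.take (k + 1)).count cs[k] := List.count_pos_iff.mpr hmemtake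
      simp; omega
    have hdrop : cs.drop k = cs[k] :: cs.drop (k + 1) := List.drop_eq_getElem_cons hklt
    have hstep : helperStep cs (((k : Int) - 1), PySem.Dict.counter (cs.take k), d, count) (k : Int)
        = ((((k : Nat) + 1 : Nat) : Int) - 1, PySem.Dict.counter (cs.take (k + 1)),
           (let d' := d.modify cs[k] 0 (· - 1);
            if d'.getD cs[k] 0 == 0 then d'.erase cs[k] else d'), count') := by
      simp only [helperStep, hcond, hc1, hleft, hnotz, Bool.false_eq_true, if_false, ← hcount']
      have hstart : ((k : Int) - 1) + 1 = (((k : Nat) + 1 : Nat) : Int) - 1 := by push_cast; ring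
      have hc2 : PySem.List.pyGetD cs (k : Int) ' ' = cs[k] := by
        rw [PySem.List.pyGetD_natCast, List.getD_eq_getElem?_getD,
          List.getElem?_eq_getElem hklt, Option.getD_some]
      rw [hstart, hc2]
    rw [hstep]
    have hd' : RInv (let d' := d.modify cs[k] 0 (· - 1);
        if d'.getD cs[k] 0 == 0 then d'.erase cs[k] else d') (cs.drop (k + 1)) := by
      apply RInv_step
      rw [← hdrop]; exact hd
    have hcast : (k : Int) + 1 = (((k : Nat) + 1 : Nat) : Int) := by push_cast; ring
    rw [hcast]
    exact ih (k + 1) (by omega) (by omega) (by omega) _ hd' count'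

-- B-side lemmas

theorem equal_congr (s s' t t' : PySem.Set Char)
    (hs : ∀ x, x ∈ s ↔ x ∈ s') (ht : ∀ x, x ∈ t ↔ x ∈ t') :
    PySem.Set.equal s t = PySem.Set.equal s' t' := by
  by_cases hp : ∀ x : Char, x ∈ s' ↔ x ∈ t'
  · rw [(PySem.Set.equal_iff s t).mpr (fun x => by rw [hs x, ht x]; exact hp x),
      (PySem.Set.equal_iff s' t').mpr hp]
  · have e1 := (Bool.not_eq_true _).mp
      (fun hh => hp (fun x => by rw [← hs x, ← ht x]; exact (PySem.Set.equal_iff s t).mp hh x))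
    have e2 := (Bool.not_eq_true _).mp (fun hh => hp ((PySem.Set.equal_iff s' t').mp hh))
    rw [e1, e2]

theorem build_snd (u : List Char) : ∀ (s : PySem.Set Char) (acc : List (PySem.Set Char)),
    (u.foldl (fun (st : PySem.Set Char × List (PySem.Set Char)) c =>
        (st.1.add c, st.2 ++ [st.1.add c])) (s, acc)).2
    = acc ++ (List.range u.length).map (fun j => PySem.Set.update s (u.take (j + 1))) := by
  induction u with
  | nil => intro s acc; simp
  | cons c u ih =>
    intro s acc
    simp only [List.foldl_cons]
    rw [ih, List.length_cons, List.range_succ_eq_map, List.map_cons, List.map_map]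
    simp only [List.take_succ_cons, PySem.Set.update_cons, Function.comp_def, List.take_zero,
      PySem.Set.update_nil]
    rw [List.append_assoc]
    simp [Nat.succ_eq_add_one]

theorem getElem_reverse_map_range (f : Nat → PySem.Set Char) (n i : Nat) (_hi : i < n)
    (h : i < ((List.range n).map f).reverse.length) :
    ((List.range n).map f).reverse[i] = f (n - 1 - i) := by
  rw [List.getElem_reverse]
  simp only [List.getElem_map, List.getElem_range, List.length_map, List.length_range]

theorem alt_loop (cs : List Char) (suffixSets : List (PySem.Set Char))
    (hlen : suffixSets.length = cs.length)
    (hsuf : ∀ (i : Nat) (h : i < cs.length) (x : Char),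
      x ∈ suffixSets[i]'(by omega) ↔ x ∈ cs.drop i) (n : Nat) :
    ∀ (k : Nat), 1 ≤ k → k ≤ cs.length → cs.length - k = n →
    ∀ (pre : PySem.Set Char), (∀ x, x ∈ pre ↔ x ∈ cs.take (k - 1)) → ∀ (count : Int),
    ((PySem.List.pyRange (k : Int) (cs.length : Int) 1).foldl
        (fun (st : PySem.Set Char × Int) i =>
          let pref := PySem.Set.union st.1 (PySem.Set.ofList [PySem.List.pyGetD cs (i - 1) ' '])
          let count := if PySem.Set.equal pref (PySem.List.pyGetD suffixSets i PySem.Set.empty)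
                       then st.2 + 1 else st.2
          (pref, count)) (pre, count)).2
      = (PySem.List.pyRange (k : Int) (cs.length : Int) 1).foldl
          (fun count i =>
            if PySem.Set.equal (PySem.Set.ofList (PySem.List.slice cs none (some i)))
                               (PySem.Set.ofList (PySem.List.slice cs (some i) none))
            then count + 1 else count) count := by
  induction n with
  | zero =>
    intro k hk1 hkn hn pre hpre count
    rw [PySem.List.pyRange_one_eq_nil (by omega)]
    rfl
  | succ n ih =>
    intro k hk1 hkn hn pre hpre count
    have hklt : k < cs.length := by omega
    rw [PySem.List.pyRange_one_cons (by exact_mod_cast hklt)]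
    simp only [List.foldl_cons]
    have hidx : ((k : Int) - 1) = (((k - 1 : Nat)) : Int) := by omega
    have hc : PySem.List.pyGetD cs ((k : Int) - 1) ' ' = cs[k - 1] := by
      rw [hidx, PySem.List.pyGetD_natCast, List.getD_eq_getElem?_getD,
        List.getElem?_eq_getElem (by omega), Option.getD_some]
    have htake : cs.take (k - 1) ++ [cs[k - 1]] = cs.take k := by
      have hk : k = (k - 1) + 1 := by omega
      conv_rhs => rw [hk]
      rw [List.take_add_one, List.getElem?_eq_getElem (by omega)]; rfl
    have hprefix : ∀ x, x ∈ PySem.Set.union pre (PySem.Set.ofList [cs[k - 1]]) ↔ x ∈ cs.take k := by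
      intro x
      rw [PySem.Set.mem_union, PySem.Set.mem_ofList, hpre x, ← htake, List.mem_append,
        List.mem_singleton]
    have hget : PySem.List.pyGetD suffixSets (k : Int) PySem.Set.empty = suffixSets[k]'(by omega) := by
      rw [PySem.List.pyGetD_natCast, List.getD_eq_getElem?_getD,
        List.getElem?_eq_getElem (by omega), Option.getD_some]
    have hcond : PySem.Set.equal (PySem.Set.union pre (PySem.Set.ofList [cs[k - 1]]))
          (PySem.List.pyGetD suffixSets (k : Int) PySem.Set.empty)
        = PySem.Set.equal (PySem.Set.ofList (PySem.List.slice cs none (some (k : Int))))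
                          (PySem.Set.ofList (PySem.List.slice cs (some (k : Int)) none)) := by
      rw [hget, PySem.List.slice_to_natCast, PySem.List.slice_from_natCast]
      apply equal_congr
      · intro x; rw [hprefix x, PySem.Set.mem_ofList]
      · intro x; rw [hsuf k hklt x, PySem.Set.mem_ofList]
    simp only [hc, hcond]
    have hcast : (k : Int) + 1 = (((k + 1 : Nat)) : Int) := by push_cast; ring
    rw [hcast]
    exact ih (k + 1) (by omega) (by omega) (by omega)
      (PySem.Set.union pre (PySem.Set.ofList [cs[k - 1]]))
      (by intro x; rw [hprefix x]; simp) _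

theorem helper_alt_eq (string : String) (hcs : string.toList ≠ []) :
    helper_alt string
      = (PySem.List.pyRange 1 (string.toList.length : Int) 1).foldl
          (fun count i =>
            if PySem.Set.equal (PySem.Set.ofList (PySem.List.slice string.toList none (some i)))
                               (PySem.Set.ofList (PySem.List.slice string.toList (some i) none))
            then count + 1 else count) 0 := by
  unfold helper_alt
  simp only [PySem.List.len_eq]
  have hlam : (fun (st : PySem.Set Char × List (PySem.Set Char)) c =>
      let seen := PySem.Set.union st.1 (PySem.Set.ofList [c])
      (seen, st.2 ++ [seen]))
      = (fun (st : PySem.Set Char × List (PySem.Set Char)) c =>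
          (st.1.add c, st.2 ++ [st.1.add c])) := rfl
  rw [hlam, build_snd string.toList.reverse PySem.Set.empty []]
  simp only [List.nil_append, List.length_reverse]
  set cs := string.toList with hcsdef
  set f : Nat → PySem.Set Char :=
    fun j => PySem.Set.update PySem.Set.empty (cs.reverse.take (j + 1)) with hf
  have hlen : ((List.range cs.length).map f).reverse.length = cs.length := by simp
  have hsuf : ∀ (i : Nat) (h : i < cs.length) (x : Char),
      x ∈ ((List.range cs.length).map f).reverse[i]'(by omega) ↔ x ∈ cs.drop i := by
    intro i hi x
    rw [getElem_reverse_map_range f cs.length i hi]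
    rw [hf]
    simp only []
    rw [PySem.Set.mem_update]
    have harith : (cs.length - 1 - i) + 1 = cs.length - i := by omega
    rw [harith, List.take_reverse]
    have h2 : cs.length - (cs.length - i) = i := by omega
    rw [h2]
    simp [PySem.Set.empty]
  have h1 : (1 : Int) = ((1 : Nat) : Int) := by norm_num
  rw [h1]
  exact alt_loop cs ((List.range cs.length).map f).reverse hlen hsuf (cs.length - 1) 1
    (by omega) (by have := List.length_pos_iff.mpr hcs; omega) rfl PySem.Set.empty
    (by intro x; simp [PySem.Set.empty]) 0

-- ===== VERDICT (by name: the statement is the Claim_ definition above) =====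
theorem helper_spec : Claim_equal_helper := by
  intro string _hdom hpre
  unfold Spec_helper
  have hcs : string.toList ≠ [] := by
    intro h
    exact hpre (by rwa [← String.toList_eq_nil_iff])
  rw [helper_alt_eq string hcs]
  unfold helper
  obtain ⟨c, t, hct⟩ := List.exists_cons_of_ne_nil hcs
  rw [hct]
  have h1 : (1 : Int) = ((1 : Nat) : Int) := by norm_num
  have hlen : PySem.List.len (c :: t) = (((c :: t) : List Char).length : Int) := by
    simp [PySem.List.len_eq]
  simp only [hlen]
  have hinit : PySem.Dict.counter [PySem.List.pyGetD (c :: t) 0 ' ']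
      = PySem.Dict.counter ((c :: t).take 1) := by
    simp [PySem.List.pyGetD_zero_cons]
  have hr0 : PySem.List.slice (c :: t) (some 1) none = (c :: t).drop 1 := by
    rw [h1, PySem.List.slice_from_natCast]
  rw [hinit, hr0]
  have := loop_eq (c :: t) ((c :: t).length - 1) 1 (by omega) (by simp) rfl
    (PySem.Dict.counter ((c :: t).drop 1)) (RInv_counter _) 0
  rw [h1]
  simpa using this
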